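-- pv_equiv track=rewrite | github.com/lukasp1209/Amalea | mc_test_app/helpers.py | smart_quotes_de
-- ===== SOURCE A (Python) =====
-- def smart_quotes_de(text: str) -> str:
--     """Wandelt gerade doppelte Anführungszeichen in deutsche „…“ um."""
--     if not text or '"' not in text:
--         return text
--     out = []
--     open_expected = True
--     for ch in text:
--         if ch == '"':
--             out.append('„' if open_expected else '“')
--             open_expected = not open_expected
--         else:
--             out.append(ch)
--     return ''.join(out)
-- ===== SOURCE B (Python) =====
-- def smart_quotes_de(text: str) -> str:
--     """Wandelt gerade doppelte Anführungszeichen in deutsche „…“ um."""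
--     parts = text.split('"')
--     res = [parts[0]]
--     for i, p in enumerate(parts[1:]):
--         res.append('„' if i % 2 == 0 else '“')
--         res.append(p)
--     return ''.join(res)
-- ===== Notes on version B (the rewrite author's own statement) =====
-- stated objective: idiomatic
-- what changed: Replaced A's character-by-character loop with a toggled open/close flag by the idiomatic split at straight double quotes followed by joining the parts with alternating German quote marks chosen by separator-index parity.
import Mathlib
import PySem

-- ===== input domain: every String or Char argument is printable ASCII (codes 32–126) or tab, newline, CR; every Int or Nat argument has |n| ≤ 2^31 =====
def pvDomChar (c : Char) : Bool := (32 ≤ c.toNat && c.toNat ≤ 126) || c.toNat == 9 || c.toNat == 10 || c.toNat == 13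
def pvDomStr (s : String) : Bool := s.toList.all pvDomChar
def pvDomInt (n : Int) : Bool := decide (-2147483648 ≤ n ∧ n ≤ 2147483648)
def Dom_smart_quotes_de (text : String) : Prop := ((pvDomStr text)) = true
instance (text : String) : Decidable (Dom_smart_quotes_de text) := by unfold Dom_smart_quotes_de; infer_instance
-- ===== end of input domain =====

-- B replaces A's character-by-character toggle loop by split-on-'"' plus an alternating join (idiomatic decomposition).

-- ===== PORT A =====
-- A's loop state: the list of appended pieces and the open_expected flag.
def smart_quotes_de (text : String) : String :=
  if text = "" ∨ PySem.Chars.isIn ['"'] text.toList = false then text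
  else
    let st := text.toList.foldl
      (fun (st : List (List Char) × Bool) ch =>
        if ch = '"' then (st.1 ++ [if st.2 then ['„'] else ['“']], !st.2)
        else (st.1 ++ [[ch]], st.2))
      ([], true)
    String.ofList (PySem.Chars.join [] st.1)

-- ===== PORT B =====
def smart_quotes_de_alt (text : String) : String :=
  let parts := PySem.Chars.splitOn text.toList ['"']
  let res := (PySem.List.enumerate (PySem.List.slice parts (some 1) none) 0).foldl
    (fun acc ip => acc ++ [(if PySem.Int.mod ip.1 2 == 0 then ['„'] else ['“']), ip.2])
    [PySem.List.pyGetD parts 0 []]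
  String.ofList (PySem.Chars.join [] res)

-- ===== PRECONDITION & SPEC =====
def Spec_smart_quotes_de (text : String) (out : String) : Prop := out = smart_quotes_de_alt text
instance (text : String) (out : String) : Decidable (Spec_smart_quotes_de text out) := by unfold Spec_smart_quotes_de; infer_instance

-- ===== CLAIM (what is proved, stated in full; the proofs are below) =====
def Claim_equal_smart_quotes_de : Prop := ∀ (text : String), Dom_smart_quotes_de text → Spec_smart_quotes_de text (smart_quotes_de text)

-- ===== LEMMAS AND PROOFS =====

-- Reference splitter: text.split('"') as structural recursion.
def pvSplit : List Char → List (List Char)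
  | [] => [[]]
  | c :: cs => if c = '"' then [] :: pvSplit cs else (pvSplit cs).modifyHead (c :: ·)

lemma pvSplit_ne_nil (cs : List Char) : pvSplit cs ≠ [] := by
  induction cs with
  | nil => simp [pvSplit]
  | cons c cs ih =>
    simp only [pvSplit]
    split
    · simp
    · cases h : pvSplit cs with
      | nil => exact absurd h ih
      | cons a t => simp

lemma splitOn_go_eq (fuel : Nat) (l cur : List Char) (acc : List (List Char))
    (hf : l.length < fuel) :
    PySem.Chars.splitOn.go ['"'] fuel l cur acc
      = acc.reverse ++ (pvSplit l).modifyHead (cur.reverse ++ ·) := by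
  induction fuel generalizing l cur acc with
  | zero => omega
  | succ f ih =>
    cases l with
    | nil => simp [PySem.Chars.splitOn.go, pvSplit]
    | cons c rest =>
      by_cases hc : c = '"'
      · subst hc
        have hpre : List.isPrefixOf ['"'] ('"' :: rest) = true := by
          simp [List.isPrefixOf]
        rw [PySem.Chars.splitOn.go]
        simp only [hpre, if_pos]
        have := ih rest [] ((cur.reverse) :: acc) (by simpa using Nat.lt_of_succ_lt_succ hf)
        simp only [List.drop, List.length_singleton] at this ⊢
        rw [this]
        cases h : pvSplit rest with
        | nil => exact absurd h (pvSplit_ne_nil rest)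
        | cons a t => simp [pvSplit, h]
      · have hpre : List.isPrefixOf ['"'] (c :: rest) = false := by
          simp [List.isPrefixOf]; intro h; exact absurd h.symm hc
        rw [PySem.Chars.splitOn.go]
        simp only [hpre, Bool.false_eq_true, if_false]
        rw [ih rest (c :: cur) acc (by simpa using Nat.lt_of_succ_lt_succ hf)]
        cases h : pvSplit rest with
        | nil => exact absurd h (pvSplit_ne_nil rest)
        | cons a t => simp [pvSplit, hc, h]

lemma splitOn_eq_pvSplit (cs : List Char) :
    PySem.Chars.splitOn cs ['"'] = pvSplit cs := by
  rw [PySem.Chars.splitOn, splitOn_go_eq (cs.length + 1) cs [] [] (by omega)]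
  cases h : pvSplit cs with
  | nil => exact absurd h (pvSplit_ne_nil cs)
  | cons a t => simp

lemma pvSplit_no_quote (cs : List Char) (h : '"' ∉ cs) : pvSplit cs = [cs] := by
  induction cs with
  | nil => rfl
  | cons c rest ih =>
    simp only [List.mem_cons, not_or] at h
    simp [pvSplit, Ne.symm h.1, ih h.2]

-- join with empty separator is flatten
lemma join_nil_eq_flatten (l : List (List Char)) :
    PySem.Chars.join [] l = l.flatten := by
  induction l with
  | nil => simp [PySem.Chars.join_nil]
  | cons p t ih =>
    cases t with
    | nil => simp [PySem.Chars.join_singleton]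
    | cons q r => rw [PySem.Chars.join_cons_cons]; simp at ih ⊢; exact ih

-- the pieces A's loop appends
def pvPiecesA : List Char → Bool → List (List Char)
  | [], _ => []
  | c :: cs, b =>
      if c = '"' then (if b then ['„'] else ['“']) :: pvPiecesA cs (!b)
      else [c] :: pvPiecesA cs b

lemma foldA_eq (cs : List Char) (acc : List (List Char)) (b : Bool) :
    (cs.foldl
      (fun (st : List (List Char) × Bool) ch =>
        if ch = '"' then (st.1 ++ [if st.2 then ['„'] else ['“']], !st.2)
        else (st.1 ++ [[ch]], st.2))
      (acc, b)).1 = acc ++ pvPiecesA cs b := by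
  induction cs generalizing acc b with
  | nil => simp [pvPiecesA]
  | cons c rest ih =>
    by_cases hc : c = '"'
    · subst hc; simp only [List.foldl_cons, pvPiecesA, ih]; simp
    · simp only [List.foldl_cons, if_neg hc, pvPiecesA, ih]; simp

-- the pieces B's loop appends after the head part (toggle form)
def pvTailPieces : List (List Char) → Bool → List (List Char)
  | [], _ => []
  | p :: ps, b => (if b then ['„'] else ['“']) :: p :: pvTailPieces ps (!b)

lemma fmod_two_eq_emod (a : Int) : a.fmod 2 = a % 2 := by rw [Int.fmod_eq_emod]; simp

lemma int_mod_two_succ (n : Int) :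
    (PySem.Int.mod (n + 1) 2 == 0) = !(PySem.Int.mod n 2 == 0) := by
  simp only [PySem.Int.mod, fmod_two_eq_emod]
  rcases Int.emod_two_eq n with h | h
  · have h1 : (n + 1) % 2 = 1 := by omega
    simp [h, h1]
  · have h1 : (n + 1) % 2 = 0 := by omega
    simp [h, h1]

lemma foldB_eq (ps : List (List Char)) (n : Int) (acc : List (List Char)) :
    (PySem.List.enumerate ps n).foldl
      (fun acc ip => acc ++ [(if PySem.Int.mod ip.1 2 == 0 then ['„'] else ['“']), ip.2])
      acc = acc ++ pvTailPieces ps (PySem.Int.mod n 2 == 0) := by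
  induction ps generalizing n acc with
  | nil => simp [PySem.List.enumerate, pvTailPieces]
  | cons p rest ih =>
    simp only [PySem.List.enumerate, List.foldl_cons]
    rw [ih (n + 1), int_mod_two_succ]
    simp [pvTailPieces]

-- main correspondence: A's flattened pieces = head of split ++ flattened alternating tail pieces
lemma piecesA_eq_split (cs : List Char) (b : Bool) :
    (pvPiecesA cs b).flatten
      = (pvSplit cs).headD [] ++ (pvTailPieces (pvSplit cs).tail b).flatten := by
  induction cs generalizing b with
  | nil => simp [pvSplit, pvPiecesA, pvTailPieces]
  | cons c rest ih =>
    by_cases hc : c = '"'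
    · subst hc
      cases hrest : pvSplit rest with
      | nil => exact absurd hrest (pvSplit_ne_nil rest)
      | cons a s =>
        have ih' := ih (!b)
        rw [hrest] at ih'
        simp [pvSplit, pvPiecesA, pvTailPieces, hrest, ih']
    · cases hrest : pvSplit rest with
      | nil => exact absurd hrest (pvSplit_ne_nil rest)
      | cons a s =>
        have ih' := ih b
        rw [hrest] at ih'
        simp [pvSplit, pvPiecesA, hc, hrest, ih']

lemma mem_isIn (cs : List Char) (h : '"' ∈ cs) :
    PySem.Chars.isIn ['"'] cs = true := by
  rw [PySem.Chars.isIn_iff_infix]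
  obtain ⟨s, t, rfl⟩ := List.append_of_mem h
  exact ⟨s, t, by simp⟩

lemma alt_closed_form (text : String) :
    smart_quotes_de_alt text
      = String.ofList ((pvSplit text.toList).headD []
          ++ (pvTailPieces (pvSplit text.toList).tail true).flatten) := by
  simp only [smart_quotes_de_alt]
  rw [splitOn_eq_pvSplit]
  cases hsp : pvSplit text.toList with
  | nil => exact absurd hsp (pvSplit_ne_nil text.toList)
  | cons h t =>
    have hslice : PySem.List.slice (h :: t) (some 1) none = t := by
      simpa using PySem.List.slice_from (h :: t) (a := (1 : Int)) (by norm_num)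
    rw [hslice, PySem.List.pyGetD_zero_cons, foldB_eq t 0 [h], join_nil_eq_flatten]
    have hm : (PySem.Int.mod 0 2 == 0) = true := by decide
    rw [hm]
    simp

-- ===== VERDICT (by name: the statement is the Claim_ definition above) =====
theorem smart_quotes_de_spec : Claim_equal_smart_quotes_de := by
  intro text _
  unfold Spec_smart_quotes_de
  rw [alt_closed_form]
  unfold smart_quotes_de
  by_cases hg : text = "" ∨ PySem.Chars.isIn ['"'] text.toList = false
  · rw [if_pos hg]
    have hnq : '"' ∉ text.toList := by
      intro hmem
      rcases hg with hg | hg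
      · subst hg; simp at hmem
      · rw [mem_isIn _ hmem] at hg; exact Bool.true_eq_false ▸ hg
    rw [pvSplit_no_quote text.toList hnq]
    simp [pvTailPieces]
  · rw [if_neg hg]
    simp only []
    rw [foldA_eq text.toList [] true, List.nil_append, join_nil_eq_flatten,
      piecesA_eq_split text.toList true]
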